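-- pv_equiv track=rewrite | github.com/Yifei-Shang42/rosalind_answers | rosalind.py | read_fasta_as_dict
-- ===== SOURCE A (Python) =====
-- def read_fasta_as_dict(data):
--     dict_data = {}
--     for i in range(len(data)):
--         if data[i][0] == ">":
--             base = ""
--             for j in range(len(data[i:-1])):
--                 if data[i+j+1][0] != ">":
--                     base += data[i+j+1]
--                 else:
--                     break
--             dict_data[data[i]] = base
--     return dict_data
-- ===== SOURCE B (Python) =====
-- def read_fasta_as_dict(data):
--     headers = [i for i in range(len(data)) if data[i][0] == ">"]
--     result = {}
--     for k, h in enumerate(headers):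
--         end = headers[k + 1] if k + 1 < len(headers) else len(data)
--         result[data[h]] = "".join(data[h + 1:end])
--     return result
-- ===== Notes on version B (the rewrite author's own statement) =====
-- stated objective: simpler
-- what changed: A rescans the tail of the list from each header with a nested break-loop and a slice copy; B makes one pass collecting the header positions and builds each value as a single join of the slice between consecutive headers.
import Mathlib
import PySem

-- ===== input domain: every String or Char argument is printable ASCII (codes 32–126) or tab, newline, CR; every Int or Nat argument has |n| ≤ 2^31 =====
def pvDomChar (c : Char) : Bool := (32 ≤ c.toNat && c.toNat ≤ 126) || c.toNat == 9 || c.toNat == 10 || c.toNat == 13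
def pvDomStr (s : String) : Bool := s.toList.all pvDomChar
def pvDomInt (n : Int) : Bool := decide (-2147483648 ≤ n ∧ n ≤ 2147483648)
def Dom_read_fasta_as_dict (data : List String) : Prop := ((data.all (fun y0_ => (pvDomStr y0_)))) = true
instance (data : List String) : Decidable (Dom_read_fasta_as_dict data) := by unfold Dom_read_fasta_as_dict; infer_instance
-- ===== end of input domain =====

-- B replaces A's nested per-header rescan (with break and a slice copy) by one pass
-- collecting header positions and a join of the slice between consecutive headers
-- (objective: simpler).

-- s[0] of a line; '.getD ' '' totalizes the IndexError Python raises on an empty line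
-- (such inputs are excluded by Pre_ below; both Pythons raise there).
def pvFC (s : String) : Char := (PySem.Str.pyGet? s 0).getD ' '

-- ===== PORT A =====
-- inner loop 'for j in range(len(data[i:-1])): if data[i+j+1][0] != ">": base += … else: break'
def pvBaseLoop (data : List String) (i : Int) : List Int → String → String
  | [], base => base
  | j :: js, base =>
      if pvFC (PySem.List.pyGetD data (i + j + 1) "") != '>' then
        pvBaseLoop data i js (base ++ PySem.List.pyGetD data (i + j + 1) "")
      else base

def read_fasta_as_dict (data : List String) : List (String × String) :=
  ((PySem.List.pyRange 0 (data.length : Int) 1).foldl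
    (fun d i =>
      if pvFC (PySem.List.pyGetD data i "") == '>' then
        d.insert (PySem.List.pyGetD data i "")
          (pvBaseLoop data i
            (PySem.List.pyRange 0 (((PySem.List.slice data (some i) (some (-1))).length : Int)) 1) "")
      else d)
    PySem.Dict.empty).items

-- ===== PORT B =====
def read_fasta_as_dict_alt (data : List String) : List (String × String) :=
  let headers := (PySem.List.pyRange 0 (data.length : Int) 1).filter
      (fun i => pvFC (PySem.List.pyGetD data i "") == '>')
  ((PySem.List.enumerate headers 0).foldl
    (fun d kh =>
      let e : Int := if kh.1 + 1 < (headers.length : Int)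
                     then PySem.List.pyGetD headers (kh.1 + 1) 0 else (data.length : Int)
      d.insert (PySem.List.pyGetD data kh.2 "")
        (PySem.Str.join "" (PySem.List.slice data (some (kh.2 + 1)) (some e))))
    PySem.Dict.empty).items

-- ===== PRECONDITION & SPEC =====
-- Pre_ excludes inputs containing an empty line: there the Python A raises IndexError
-- on data[i][0] (B raises the same IndexError there).
def Pre_read_fasta_as_dict (data : List String) : Prop := ∀ s ∈ data, s ≠ ""
instance (data : List String) : Decidable (Pre_read_fasta_as_dict data) := by
  unfold Pre_read_fasta_as_dict; infer_instance
def pvWitness_read_fasta_as_dict : List String := [">a", "GAT", "TC", ">b", ">c", "AA"]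

def Spec_read_fasta_as_dict (data : List String) (out : List (String × String)) : Prop := out = read_fasta_as_dict_alt data
instance (data : List String) (out : List (String × String)) : Decidable (Spec_read_fasta_as_dict data out) := by unfold Spec_read_fasta_as_dict; infer_instance

-- ===== CLAIM (what is proved, stated in full; the proofs are below) =====
def Claim_equal_read_fasta_as_dict : Prop := ∀ (data : List String), Dom_read_fasta_as_dict data → Pre_read_fasta_as_dict data → Spec_read_fasta_as_dict data (read_fasta_as_dict data)

-- ===== LEMMAS AND PROOFS =====

-- the header test 'data[i][0] == ">"' as a predicate on the index
def pvP (data : List String) (i : Int) : Bool := pvFC (PySem.List.pyGetD data i "") == '>'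

-- the sequence A's inner loop collects, as a structural function of the tail of the list
def pvSeq : List String → String
  | [] => ""
  | s :: t => if pvFC s == '>' then "" else s ++ pvSeq t

theorem pv_foldl_if_filter (key val : Int → String) (p : Int → Bool) :
    ∀ (l : List Int) (d : PySem.Dict String String),
      l.foldl (fun d i => if p i then d.insert (key i) (val i) else d) d
        = (l.filter p).foldl (fun d i => d.insert (key i) (val i)) d := by
  intro l
  induction l with
  | nil => intro d; rfl
  | cons x xs ih =>
      intro d
      by_cases h : p x = true <;> simp [h, ih]

theorem pv_baseLoop_acc (data : List String) (i : Int) :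
    ∀ (js : List Int) (acc : String),
      pvBaseLoop data i js acc = acc ++ pvBaseLoop data i js "" := by
  intro js
  induction js with
  | nil => intro acc; simp [pvBaseLoop]
  | cons j js ih =>
      intro acc
      by_cases h : (pvFC (PySem.List.pyGetD data (i + j + 1) "") != '>') = true
      · simp only [pvBaseLoop, h, if_true, String.empty_append]
        rw [ih (acc ++ _), ih (PySem.List.pyGetD data (i + j + 1) ""), String.append_assoc]
      · simp only [pvBaseLoop, h]
        simp

theorem pv_baseLoop_eq_seq (data : List String) :
    ∀ (c : Nat) (i a : Int), 0 ≤ i → 0 ≤ a → i + 1 + a ≤ (data.length : Int) →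
      c = (((data.length : Int) - 1 - i) - a).toNat →
      pvBaseLoop data i (PySem.List.pyRange a ((data.length : Int) - 1 - i) 1) ""
        = pvSeq (data.drop (i + 1 + a).toNat) := by
  intro c
  induction c with
  | zero =>
      intro i a hi ha hle hc
      rw [PySem.List.pyRange_one_eq_nil (by omega)]
      rw [List.drop_eq_nil_of_le (by omega)]
      rfl
  | succ c ih =>
      intro i a hi ha hle hc
      have hlt : a < (data.length : Int) - 1 - i := by omega
      rw [PySem.List.pyRange_one_cons hlt]
      have hpos : (i + 1 + a).toNat < data.length := by omega
      have hget : PySem.List.pyGetD data (i + a + 1) "" = data[(i + 1 + a).toNat] := by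
        rw [PySem.List.pyGetD_eq_getElem data "" (by omega) (by omega)]
        congr 1; omega
      rw [List.drop_eq_getElem_cons hpos]
      show pvBaseLoop data i (a :: _) "" = pvSeq (_ :: _)
      simp only [pvBaseLoop, pvSeq, hget]
      by_cases h : pvFC data[(i + 1 + a).toNat] = '>'
      · have h1 : (pvFC data[(i + 1 + a).toNat] != '>') = false := by simp [h]
        have h2 : (pvFC data[(i + 1 + a).toNat] == '>') = true := by simp [h]
        rw [h1, h2]; simp
      · have h1 : (pvFC data[(i + 1 + a).toNat] != '>') = true := by simp [h]
        have h2 : (pvFC data[(i + 1 + a).toNat] == '>') = false := by simp [h]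
        rw [h1, h2]
        simp only [if_true, Bool.false_eq_true, if_false]
        rw [pv_baseLoop_acc, String.empty_append]
        have heq : (i + 1 + (a + 1)).toNat = (i + 1 + a).toNat + 1 := by omega
        rw [ih i (a + 1) hi (by omega) (by omega) (by omega), heq]

theorem pv_join_cons (s : String) (t : List String) :
    PySem.Str.join "" (s :: t) = s ++ PySem.Str.join "" t := by
  cases t with
  | nil => simp [PySem.Str.join, PySem.Chars.join_singleton, PySem.Chars.join_nil]
  | cons b t => simp [PySem.Str.join, PySem.Chars.join_cons_cons]

theorem pv_seq_append_join :
    ∀ (t rest : List String), (∀ s ∈ t, (pvFC s == '>') = false) →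
      (rest = [] ∨ ∃ s rest', rest = s :: rest' ∧ (pvFC s == '>') = true) →
      pvSeq (t ++ rest) = PySem.Str.join "" t := by
  intro t
  induction t with
  | nil =>
      intro rest _ hrest
      rcases hrest with h | ⟨s, rest', rfl, hs⟩
      · subst h; simp [pvSeq, PySem.Str.join, PySem.Chars.join_nil]
      · simp [pvSeq, hs, PySem.Str.join, PySem.Chars.join_nil]
  | cons s t ih =>
      intro rest hall hrest
      have hs : (pvFC s == '>') = false := hall s (by simp)
      rw [pv_join_cons]
      show pvSeq (s :: (t ++ rest)) = _
      simp only [pvSeq, hs, Bool.false_eq_true, if_false]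
      rw [ih rest (fun x hx => hall x (by simp [hx])) hrest]

theorem pv_mem_enumerate {α : Type} :
    ∀ (xs : List α) (s : Int) (pr : Int × α), pr ∈ PySem.List.enumerate xs s →
      ∃ k : Nat, pr.1 = s + k ∧ xs[k]? = some pr.2 := by
  intro xs
  induction xs with
  | nil => intro s pr h; simp [PySem.List.enumerate_nil] at h
  | cons x xs ih =>
      intro s pr h
      rw [PySem.List.enumerate_cons] at h
      rcases List.mem_cons.mp h with h | h
      · exact ⟨0, by simp [h], by simp [h]⟩
      · obtain ⟨k, hk1, hk2⟩ := ih (s + 1) pr h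
        exact ⟨k + 1, by omega, by simpa using hk2⟩

theorem pv_fold_congr (key : Int → String) (vB : Int × Int → String) (vA : Int → String) :
    ∀ (l : List Int) (k0 : Int) (d : PySem.Dict String String),
      (∀ pr ∈ PySem.List.enumerate l k0, vB pr = vA pr.2) →
      (PySem.List.enumerate l k0).foldl (fun d pr => d.insert (key pr.2) (vB pr)) d
        = l.foldl (fun d h => d.insert (key h) (vA h)) d := by
  intro l
  induction l with
  | nil => intro k0 d _; simp [PySem.List.enumerate_nil]
  | cons x xs ih =>
      intro k0 d hall
      rw [PySem.List.enumerate_cons]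
      simp only [List.foldl_cons]
      rw [hall (k0, x) (by rw [PySem.List.enumerate_cons]; simp)]
      exact ih (k0 + 1) _ (fun pr hpr => hall pr (by rw [PySem.List.enumerate_cons]; simp [hpr]))

-- the heart: at the k-th header h, B's join over the slice up to the next header equals
-- the value A's inner break-loop collects from h
theorem pv_value_eq (data : List String) (hs : List Int)
    (hsdef : hs = (PySem.List.pyRange 0 (data.length : Int) 1).filter (pvP data))
    (k : Nat) (h : Int) (hkh : hs[k]? = some h) :
    PySem.Str.join "" (PySem.List.slice data (some (h + 1))
        (some (if (k : Int) + 1 < (hs.length : Int)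
               then PySem.List.pyGetD hs ((k : Int) + 1) 0 else (data.length : Int))))
      = pvBaseLoop data h
          (PySem.List.pyRange 0 (((PySem.List.slice data (some h) (some (-1))).length : Int)) 1) "" := by
  obtain ⟨hk, hgk⟩ := List.getElem?_eq_some_iff.mp hkh
  have hmemhs : ∀ x ∈ hs, (0 ≤ x ∧ x < (data.length : Int)) ∧ pvP data x = true := by
    intro x hx
    rw [hsdef] at hx
    have hx' := List.mem_filter.mp hx
    exact ⟨PySem.List.mem_pyRange_one.mp hx'.1, hx'.2⟩
  have hpair : hs.Pairwise (· < ·) := by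
    rw [hsdef]; exact (PySem.List.pairwise_lt_pyRange_one 0 (data.length : Int)).filter _
  have hmono := List.pairwise_iff_getElem.mp hpair
  have hh : h ∈ hs := hgk ▸ List.getElem_mem hk
  obtain ⟨⟨hh0, hhn⟩, hph⟩ := hmemhs h hh
  set e : Int := if (k : Int) + 1 < (hs.length : Int)
                 then PySem.List.pyGetD hs ((k : Int) + 1) 0 else (data.length : Int) with hedef
  have he : (h < e ∧ e ≤ (data.length : Int)) ∧
      (e = (data.length : Int) ∨ (e < (data.length : Int) ∧ pvP data e = true)) ∧
      (∀ j : Int, h < j → j < e → pvP data j = false) := by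
    have hk'mono : ∀ (k' : Nat) (hk' : k' < hs.length), h < hs[k'] → k < k' := by
      intro k' hk' hlt
      by_contra hle
      rcases Nat.lt_or_ge k' k with hlt' | hge
      · have := hmono k' k hk' hk hlt'
        rw [hgk] at this; omega
      · have : k' = k := by omega
        subst this; rw [hgk] at hlt; omega
    by_cases hcase : (k : Int) + 1 < (hs.length : Int)
    · have hklt : k + 1 < hs.length := by exact_mod_cast hcase
      have hgetE : e = hs[k + 1] := by
        rw [hedef, if_pos hcase,
          PySem.List.pyGetD_eq_getElem hs 0 (by omega) (by exact_mod_cast hcase)]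
        congr 1
      have hlt1 : h < hs[k + 1] := by
        have := hmono k (k + 1) hk hklt (by omega)
        rw [hgk] at this; exact this
      have hmem1 := hmemhs hs[k + 1] (List.getElem_mem hklt)
      refine ⟨⟨by omega, by rw [hgetE]; omega⟩, Or.inr ⟨by rw [hgetE]; exact hmem1.1.2, by rw [hgetE]; exact hmem1.2⟩, ?_⟩
      intro j hj1 hj2
      by_cases hpj : pvP data j = true
      · exfalso
        have hjmem : j ∈ hs := by
          rw [hsdef]
          exact List.mem_filter.mpr ⟨PySem.List.mem_pyRange_one.mpr ⟨by omega, by rw [hgetE] at hj2; omega⟩, hpj⟩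
        obtain ⟨k', hk', hgk'⟩ := List.mem_iff_getElem.mp hjmem
        have hkk' : k < k' := hk'mono k' hk' (by rw [hgk']; exact hj1)
        have hk1k' : k + 1 ≤ k' := hkk'
        rcases Nat.eq_or_lt_of_le hk1k' with heq | hlt'
        · subst heq
          rw [hgetE, hgk'] at hj2; omega
        · have := hmono (k + 1) k' hklt hk' hlt'
          rw [hgk', ← hgetE] at this; omega
      · simpa using hpj
    · have hgetE : e = (data.length : Int) := by rw [hedef, if_neg hcase]
      refine ⟨⟨by omega, by omega⟩, Or.inl hgetE, ?_⟩
      intro j hj1 hj2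
      by_cases hpj : pvP data j = true
      · exfalso
        have hjmem : j ∈ hs := by
          rw [hsdef]
          exact List.mem_filter.mpr ⟨PySem.List.mem_pyRange_one.mpr ⟨by omega, by omega⟩, hpj⟩
        obtain ⟨k', hk', hgk'⟩ := List.mem_iff_getElem.mp hjmem
        have hkk' : k < k' := hk'mono k' hk' (by rw [hgk']; exact hj1)
        omega
      · simpa using hpj
  obtain ⟨⟨hhe, hen⟩, healt, hbetween⟩ := he
  have hL : ((PySem.List.slice data (some h) (some (-1))).length : Int)
      = (data.length : Int) - 1 - h := by
    have h1 : h = ((h.toNat : Nat) : Int) := by omega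
    rw [h1, PySem.List.length_slice, PySem.List.clampIdx_neg_one, PySem.List.clampIdx_natCast]
    omega
  rw [hL, pv_baseLoop_eq_seq data (((data.length : Int) - 1 - h) - 0).toNat h 0 hh0 le_rfl
    (by omega) rfl]
  have h10 : (h + 1 + 0).toNat = (h + 1).toNat := by omega
  rw [h10, PySem.List.slice_toNat data (by omega) (by omega)]
  have hsplit : data.drop (h + 1).toNat
      = (data.drop (h + 1).toNat).take (e.toNat - (h + 1).toNat) ++ data.drop e.toNat := by
    conv_lhs => rw [← List.take_append_drop (e.toNat - (h + 1).toNat) (data.drop (h + 1).toNat)]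
    congr 1
    rw [List.drop_drop]
    congr 1
    omega
  conv_rhs => rw [hsplit]
  refine (pv_seq_append_join _ _ ?_ ?_).symm
  · intro s hst
    obtain ⟨m, hm, hms⟩ := List.mem_iff_getElem.mp hst
    have hm' : m < e.toNat - (h + 1).toNat ∧ (h + 1).toNat + m < data.length := by
      simp [List.length_take, List.length_drop] at hm
      omega
    rw [List.getElem_take, List.getElem_drop] at hms
    rw [hms.symm, ← PySem.List.pyGetD_ofNat data ((h + 1).toNat + m) "" hm'.2]
    have hj := hbetween (h + 1 + (m : Int)) (by omega) (by omega)
    unfold pvP at hj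
    rw [show (h + 1 + (m : Int)) = (((h + 1).toNat + m : Nat) : Int) from by omega] at hj
    exact hj
  · rcases healt with hen' | ⟨hlt, hpe⟩
    · left
      have : e.toNat = data.length := by omega
      rw [this, List.drop_length]
    · right
      have hpos : e.toNat < data.length := by omega
      refine ⟨data[e.toNat], _, List.drop_eq_getElem_cons hpos, ?_⟩
      unfold pvP at hpe
      rw [PySem.List.pyGetD_eq_getElem data "" (by omega) (by omega)] at hpe
      exact hpe

-- ===== VERDICT (by name: the statement is the Claim_ definition above) =====
theorem read_fasta_as_dict_spec : Claim_equal_read_fasta_as_dict := by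
  intro data _ _
  show read_fasta_as_dict data = read_fasta_as_dict_alt data
  unfold read_fasta_as_dict read_fasta_as_dict_alt
  have hA := pv_foldl_if_filter
    (fun i => PySem.List.pyGetD data i "")
    (fun i => pvBaseLoop data i
        (PySem.List.pyRange 0 (((PySem.List.slice data (some i) (some (-1))).length : Int)) 1) "")
    (pvP data)
    (PySem.List.pyRange 0 (data.length : Int) 1) PySem.Dict.empty
  have hB := pv_fold_congr
    (fun i => PySem.List.pyGetD data i "")
    (fun kh => PySem.Str.join "" (PySem.List.slice data (some (kh.2 + 1))
        (some (if kh.1 + 1 < ((((PySem.List.pyRange 0 (data.length : Int) 1).filter (pvP data)).length : Nat) : Int)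
               then PySem.List.pyGetD ((PySem.List.pyRange 0 (data.length : Int) 1).filter (pvP data)) (kh.1 + 1) 0
               else (data.length : Int)))))
    (fun i => pvBaseLoop data i
        (PySem.List.pyRange 0 (((PySem.List.slice data (some i) (some (-1))).length : Int)) 1) "")
    ((PySem.List.pyRange 0 (data.length : Int) 1).filter (pvP data)) 0 PySem.Dict.empty
    (by
      intro pr hpr
      obtain ⟨k, hk1, hk2⟩ := pv_mem_enumerate _ _ _ hpr
      have hpr1 : pr.1 = (k : Int) := by omega
      beta_reduce
      rw [hpr1]
      exact pv_value_eq data _ rfl k pr.2 hk2)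
  exact congrArg PySem.Dict.items (hA.trans hB.symm)
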